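-- pv_equiv track=rewrite | github.com/ulu001206-byte/Heatwave-Calculation | HW.py | extract_heatwave_events
-- ===== SOURCE A (Python) =====
-- def extract_heatwave_events(data_column):
--     """提取连续≥3天的热浪事件列表"""
--     events = []
--     current_event = []
--
--     for value in data_column:
--         if value > 0:
--             current_event.append(value)
--         else:
--             if len(current_event) >= 3:
--                 events.append(current_event)
--             current_event = []
--     if len(current_event) >= 3:
--         events.append(current_event)
--
--     return events
-- ===== SOURCE B (Python) =====
-- def extract_heatwave_events(data_column):
--     """提取连续≥3天的热浪事件列表 (boundary detection + slicing, no carried run state)"""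
--     n = len(data_column)
--     starts = [i for i in range(n)
--               if data_column[i] > 0 and (i == 0 or data_column[i - 1] <= 0)]
--     ends = [i + 1 for i in range(n)
--             if data_column[i] > 0 and (i == n - 1 or data_column[i + 1] <= 0)]
--     return [data_column[s:e] for s, e in zip(starts, ends) if e - s >= 3]
-- ===== Notes on version B (the rewrite author's own statement) =====
-- stated objective: alternative
-- what changed: Replaces A's single-pass accumulator state machine (with duplicated post-loop flush) by stateless staged passes: one index pass detects run-start boundaries, one detects run-end boundaries, then zip pairs them and slices out the runs of length >= 3.
import Mathlib
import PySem

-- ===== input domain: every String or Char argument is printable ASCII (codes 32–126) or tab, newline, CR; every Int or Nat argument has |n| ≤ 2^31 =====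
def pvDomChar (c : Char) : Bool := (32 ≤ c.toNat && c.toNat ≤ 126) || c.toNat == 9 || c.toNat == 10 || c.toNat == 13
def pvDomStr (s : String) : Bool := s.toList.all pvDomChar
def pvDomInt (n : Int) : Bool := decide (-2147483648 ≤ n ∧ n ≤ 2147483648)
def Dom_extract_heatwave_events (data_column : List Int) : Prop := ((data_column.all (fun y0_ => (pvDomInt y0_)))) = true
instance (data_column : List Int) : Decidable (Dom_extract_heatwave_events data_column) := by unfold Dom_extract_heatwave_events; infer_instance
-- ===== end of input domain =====

-- B replaces A's single-pass accumulator state machine (with its duplicated post-loop flush)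
-- by stateless staged passes: detect run-start indices, detect run-end indices, zip and slice;
-- only the RETURN value is compared (neither version mutates its argument).


-- ===== PORT A =====
-- one loop step: state = (events, current_event)
def hwStep (st : List (List Int) × List Int) (v : Int) : List (List Int) × List Int :=
  if v > 0 then (st.1, st.2 ++ [v])
  else (if 3 ≤ st.2.length then st.1 ++ [st.2] else st.1, [])

def extract_heatwave_events (data_column : List Int) : List (List Int) :=
  let st := data_column.foldl hwStep ([], [])
  if 3 ≤ st.2.length then st.1 ++ [st.2] else st.1

-- ===== PORT B =====
-- the two boundary predicates of Source B's comprehensions (i always in range; getD's default unused;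
-- the `i == 0 or …` / `i == n-1 or …` short-circuits are the Bool `||`)
def hwStartP (xs : List Int) (i : Nat) : Bool :=
  decide (0 < xs.getD i 0) && (decide (i = 0) || decide (xs.getD (i - 1) 0 ≤ 0))
def hwEndP (xs : List Int) (i : Nat) : Bool :=
  decide (0 < xs.getD i 0) && (decide (i = xs.length - 1) || decide (xs.getD (i + 1) 0 ≤ 0))
def hwStarts (xs : List Int) : List Nat := (List.range xs.length).filter (hwStartP xs)
def hwEnds (xs : List Int) : List Nat := ((List.range xs.length).filter (hwEndP xs)).map (· + 1)

def extract_heatwave_events_alt (data_column : List Int) : List (List Int) :=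
  (((hwStarts data_column).zip (hwEnds data_column)).filter
      (fun p => decide (3 ≤ p.2 - p.1))).map
    (fun p => (data_column.drop p.1).take (p.2 - p.1))   -- data_column[s:e], 0 ≤ s ≤ e ≤ n here

-- ===== PRECONDITION & SPEC =====
def Spec_extract_heatwave_events (data_column : List Int) (out : List (List Int)) : Prop := out = extract_heatwave_events_alt data_column
instance (data_column : List Int) (out : List (List Int)) : Decidable (Spec_extract_heatwave_events data_column out) := by unfold Spec_extract_heatwave_events; infer_instance

-- ===== CLAIM (what is proved, stated in full; the proofs are below) =====
def Claim_equal_extract_heatwave_events : Prop := ∀ (data_column : List Int), Dom_extract_heatwave_events data_column → Spec_extract_heatwave_events data_column (extract_heatwave_events data_column)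

-- ===== LEMMAS AND PROOFS =====

-- proof-only intermediate: maximal-run recursion both programs are proved equal to
def hwFlush (cur : List Int) : List (List Int) :=
  if 3 ≤ cur.length then [cur] else []

def hwGroups : List Int → List (List Int)
  | [] => []
  | x :: xs =>
    if x > 0 then
      (let run := x :: xs.takeWhile (fun v => v > 0)
       if 3 ≤ run.length then [run] else []) ++ hwGroups (xs.dropWhile (fun v => v > 0))
    else hwGroups xs
termination_by l => l.length
decreasing_by
· simpa using Nat.lt_succ_of_le (xs.length_dropWhile_le _)
· simp

theorem hwGroups_run (l : List Int) :
    hwGroups l = hwFlush (l.takeWhile (fun v => v > 0)) ++ hwGroups (l.dropWhile (fun v => v > 0)) := by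
  cases l with
  | nil => simp [hwGroups, hwFlush]
  | cons x xs =>
    by_cases hx : x > 0
    · simp [hwGroups, hx, hwFlush]
    · simp [hwGroups, hx, hwFlush]

theorem foldl_hwStep_eq (l : List Int) :
    ∀ (events : List (List Int)) (cur : List Int),
      (let st := l.foldl hwStep (events, cur)
       if 3 ≤ st.2.length then st.1 ++ [st.2] else st.1)
      = events ++ hwFlush (cur ++ l.takeWhile (fun v => v > 0)) ++ hwGroups (l.dropWhile (fun v => v > 0)) := by
  induction l with
  | nil => intro events cur; simp [hwFlush, hwGroups]; split <;> simp
  | cons x xs ih =>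
    intro events cur
    by_cases hx : x > 0
    · have := ih events (cur ++ [x])
      simp only [List.foldl_cons, hwStep, hx, if_pos, List.takeWhile_cons, List.dropWhile_cons] at *
      simpa [hx, List.append_assoc] using this
    · have hstep : hwStep (events, cur) x = (events ++ hwFlush cur, []) := by
        simp only [hwStep, hwFlush, if_neg hx]
        split <;> simp
      have ht : (x :: xs).takeWhile (fun v => v > 0) = [] := by simp [hx]
      have hd : (x :: xs).dropWhile (fun v => v > 0) = x :: xs := by simp [hx]
      rw [List.foldl_cons, hstep, ih (events ++ hwFlush cur) [], ht, hd,
        show hwGroups (x :: xs) = hwGroups xs from by simp [hwGroups, hx],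
        hwGroups_run xs]
      simp [List.append_assoc]

theorem A_eq_groups (l : List Int) : extract_heatwave_events l = hwGroups l := by
  rw [extract_heatwave_events, foldl_hwStep_eq l [] []]
  simp [← hwGroups_run]

-- ---- boundary-list structure lemmas for B ----

theorem filter_range_succ (n : Nat) (p : Nat → Bool) :
    (List.range (n + 1)).filter p
      = (if p 0 then [0] else []) ++ ((List.range n).filter (p ∘ Nat.succ)).map Nat.succ := by
  rw [List.range_succ_eq_map, List.filter_cons, List.filter_map]
  split <;> simp

theorem startP_shift (x : Int) (t : List Int) (hx : ¬ 0 < t.getD 0 0 ∨ x ≤ 0) :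
    ∀ i, hwStartP (x :: t) (i + 1) = hwStartP t i := by
  intro i
  cases i with
  | zero =>
    simp only [hwStartP]
    rcases hx with h | h
    · rw [List.getD_eq_getElem?_getD] at h
      simp [h]
    · simp [h]
  | succ j => simp [hwStartP]

theorem startP_shift2 (x z : Int) (ys : List Int) :
    ∀ i, hwStartP (x :: z :: ys) (i + 2) = hwStartP (z :: ys) (i + 1) := by
  intro i
  simp [hwStartP]

theorem endP_shift (x : Int) (t : List Int) :
    ∀ i ∈ List.range t.length, (hwEndP (x :: t) ∘ Nat.succ) i = hwEndP t i := by
  intro i hi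
  rw [List.mem_range] at hi
  have h : (i + 1 = t.length + 1 - 1) ↔ (i = t.length - 1) := by omega
  simp only [hwEndP, Function.comp, Nat.succ_eq_add_one, List.getD_cons_succ, List.length_cons, h]

theorem ends_cons (x : Int) (t : List Int) :
    hwEnds (x :: t) = (if hwEndP (x :: t) 0 then [1] else []) ++ (hwEnds t).map (· + 1) := by
  simp only [hwEnds, List.length_cons, filter_range_succ, List.filter_congr (endP_shift x t)]
  split <;> simp [List.map_map, Function.comp, Nat.succ_eq_add_one]

theorem starts_cons_nonpos (x : Int) (t : List Int) (hx0 : ¬ 0 < t.getD 0 0 ∨ x ≤ 0)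
    (h0 : hwStartP (x :: t) 0 = false) :
    hwStarts (x :: t) = (hwStarts t).map (· + 1) := by
  simp only [hwStarts, List.length_cons, filter_range_succ, h0, Bool.false_eq_true, if_false,
    List.nil_append]
  rw [show (hwStartP (x :: t) ∘ Nat.succ) = hwStartP t from funext (startP_shift x t hx0)]

theorem starts_cons_keep (x : Int) (t : List Int) (hx : ¬ 0 < t.getD 0 0 ∨ x ≤ 0)
    (h0 : hwStartP (x :: t) 0 = true) :
    hwStarts (x :: t) = 0 :: (hwStarts t).map (· + 1) := by
  simp only [hwStarts, List.length_cons, filter_range_succ, h0, if_true]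
  rw [show (hwStartP (x :: t) ∘ Nat.succ) = hwStartP t from funext (startP_shift x t hx)]
  simp

theorem starts_cons_pos (x z : Int) (ys : List Int) (hx : 0 < x) (hz : 0 < z) :
    hwStarts (x :: z :: ys) = 0 :: ((hwStarts (z :: ys)).tail).map (· + 1) := by
  have h0 : hwStartP (x :: z :: ys) 0 = true := by simp [hwStartP, hx]
  have h1 : hwStartP (x :: z :: ys) 1 = false := by simp [hwStartP]; omega
  have hz0 : hwStartP (z :: ys) 0 = true := by simp [hwStartP, hz]
  simp only [hwStarts, List.length_cons, filter_range_succ, h0, if_true]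
  rw [show ((hwStartP (x :: z :: ys)) ∘ Nat.succ) 0 = false from h1]
  simp only [Bool.false_eq_true, if_false, List.nil_append, hz0, if_true]
  rw [show (((hwStartP (x :: z :: ys)) ∘ Nat.succ) ∘ Nat.succ) = ((hwStartP (z :: ys)) ∘ Nat.succ)
      from funext fun i => startP_shift2 x z ys i]
  simp [List.map_map]

-- ---- B = hwGroups ----

theorem zip_slice_shift (xs t : List Int) (k : Nat) (S E : List Nat)
    (hdrop : ∀ i : Nat, xs.drop (i + k) = t.drop i) :
    (((S.map (· + k)).zip (E.map (· + k))).filter (fun p => decide (3 ≤ p.2 - p.1))).map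
        (fun p => (xs.drop p.1).take (p.2 - p.1))
      = ((S.zip E).filter (fun p => decide (3 ≤ p.2 - p.1))).map
        (fun p => (t.drop p.1).take (p.2 - p.1)) := by
  rw [List.zip_map, List.filter_map, List.map_map]
  have h1 : ((fun p : Nat × Nat => decide (3 ≤ p.2 - p.1)) ∘ Prod.map (· + k) (· + k))
      = (fun p : Nat × Nat => decide (3 ≤ p.2 - p.1)) := by
    funext p
    have h : p.2 + k - (p.1 + k) = p.2 - p.1 := by omega
    simp [Prod.map, h]
  have h2 : ((fun p : Nat × Nat => (xs.drop p.1).take (p.2 - p.1)) ∘ Prod.map (· + k) (· + k))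
      = (fun p : Nat × Nat => (t.drop p.1).take (p.2 - p.1)) := by
    funext p
    have h : p.2 + k - (p.1 + k) = p.2 - p.1 := by omega
    simp [Prod.map, h, hdrop p.1]
  rw [h1, h2]

theorem alt_cons_nonpos (x : Int) (t : List Int) (hx : x ≤ 0) :
    extract_heatwave_events_alt (x :: t) = extract_heatwave_events_alt t := by
  have h0 : hwStartP (x :: t) 0 = false := by
    simp [hwStartP, show ¬ (0 < x) from not_lt.mpr hx]
  have he0 : hwEndP (x :: t) 0 = false := by
    simp [hwEndP, show ¬ (0 < x) from not_lt.mpr hx]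
  unfold extract_heatwave_events_alt
  rw [starts_cons_nonpos x t (Or.inr hx) h0, ends_cons x t, he0]
  simp only [Bool.false_eq_true, if_false, List.nil_append]
  exact zip_slice_shift (x :: t) t 1 _ _ (fun i => by simp)

theorem run_decomp : ∀ (r d : List Int), r ≠ [] → (∀ a ∈ r, 0 < a) → d.getD 0 0 ≤ 0 →
    hwStarts (r ++ d) = 0 :: (hwStarts d).map (· + r.length) ∧
    hwEnds (r ++ d) = r.length :: (hwEnds d).map (· + r.length) := by
  intro r
  induction r with
  | nil => intro d h; exact absurd rfl h
  | cons a r' ih =>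
    intro d _ hpos hd
    have ha : 0 < a := hpos a List.mem_cons_self
    cases r' with
    | nil =>
      have hnd : ¬ 0 < d.getD 0 0 := by omega
      constructor
      · have h0 : hwStartP (a :: d) 0 = true := by simp [hwStartP, ha]
        simpa using starts_cons_keep a d (Or.inl hnd) h0
      · have h0 : hwEndP (a :: d) 0 = true := by
          simp only [hwEndP, List.getD_cons_zero, List.getD_cons_succ]
          rw [List.getD_eq_getElem?_getD] at hd
          simp [ha, hd]
        rw [show ([a] : List Int) ++ d = a :: d from rfl, ends_cons a d, h0]
        simp
    | cons b r'' =>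
      have hb : 0 < b := hpos b (by simp)
      obtain ⟨hS, hE⟩ := ih d (by simp) (fun u hu => hpos u (List.mem_cons_of_mem _ hu)) hd
      rw [show (b :: r'') ++ d = b :: (r'' ++ d) from rfl] at hS hE
      have hcomp : ((fun i => i + 1) ∘ (fun i => i + (r''.length + 1)))
          = (fun i : Nat => i + (r''.length + 2)) := funext fun i => by
        simp only [Function.comp]; omega
      constructor
      · have h := starts_cons_pos a b (r'' ++ d) ha hb
        rw [hS] at h
        rw [show (a :: b :: r'') ++ d = a :: b :: (r'' ++ d) from rfl, h]
        simp only [List.tail_cons, List.length_cons, List.map_map]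
        rw [show (b :: r'').length = r''.length + 1 from rfl] at *
        simp [hcomp]
      · have h0 : hwEndP (a :: b :: (r'' ++ d)) 0 = false := by
          simp [hwEndP, show ¬ (b ≤ 0) from not_le.mpr hb]
        rw [show (a :: b :: r'') ++ d = a :: b :: (r'' ++ d) from rfl,
          ends_cons a (b :: (r'' ++ d)), h0, hE]
        simp [List.map_map, hcomp]

theorem alt_run (r d : List Int) (hr : r ≠ []) (hpos : ∀ a ∈ r, 0 < a) (hd : d.getD 0 0 ≤ 0) :
    extract_heatwave_events_alt (r ++ d) = hwFlush r ++ extract_heatwave_events_alt d := by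
  obtain ⟨hS, hE⟩ := run_decomp r d hr hpos hd
  have htail := zip_slice_shift (r ++ d) d r.length (hwStarts d) (hwEnds d)
    (fun i => by rw [Nat.add_comm]; simp [List.drop_append])
  unfold extract_heatwave_events_alt
  rw [hS, hE]
  simp only [List.zip_cons_cons, List.filter_cons]
  by_cases h3 : 3 ≤ r.length
  · simp [h3, hwFlush, htail]
  · simp [h3, hwFlush, htail]

theorem B_eq_groups (l : List Int) : extract_heatwave_events_alt l = hwGroups l := by
  induction l using hwGroups.induct with
  | case1 => simp [extract_heatwave_events_alt, hwStarts, hwEnds, hwGroups]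
  | case2 x xs hx ih =>
    have htk : (x :: xs).takeWhile (fun v => v > 0) = x :: xs.takeWhile (fun v => v > 0) := by
      simp [hx]
    have hdw : (x :: xs).dropWhile (fun v => v > 0) = xs.dropWhile (fun v => v > 0) := by
      simp [hx]
    have hsplit : x :: xs = (x :: xs.takeWhile (fun v => v > 0)) ++ xs.dropWhile (fun v => v > 0) := by
      rw [← htk, ← hdw, List.takeWhile_append_dropWhile]
    have hpos : ∀ a ∈ x :: xs.takeWhile (fun v => v > 0), 0 < a := by
      intro a ha
      rcases List.mem_cons.mp ha with h | h
      · exact h ▸ hx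
      · simpa using List.mem_takeWhile_imp h
    have hd : (xs.dropWhile (fun v => v > 0)).getD 0 0 ≤ 0 := by
      cases hD : xs.dropWhile (fun v => v > 0) with
      | nil => simp
      | cons z zs =>
        have hz := List.head?_dropWhile_not (fun v => decide (v > 0)) xs
        rw [hD] at hz
        simp only [List.head?_cons, decide_eq_false_iff_not, not_lt] at hz
        simpa using hz
    calc extract_heatwave_events_alt (x :: xs)
        = extract_heatwave_events_alt
            ((x :: xs.takeWhile (fun v => v > 0)) ++ xs.dropWhile (fun v => v > 0)) := by
          rw [← hsplit]
      _ = hwFlush (x :: xs.takeWhile (fun v => v > 0))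
            ++ extract_heatwave_events_alt (xs.dropWhile (fun v => v > 0)) :=
          alt_run _ _ (by simp) hpos hd
      _ = hwGroups (x :: xs) := by
          rw [ih]
          simp [hwGroups, hx, hwFlush]
  | case3 x xs hx ih =>
    rw [alt_cons_nonpos x xs (not_lt.mp hx), ih,
      show hwGroups (x :: xs) = hwGroups xs from by simp [hwGroups, hx]]

-- ===== VERDICT (by name: the statement is the Claim_ definition above) =====
theorem extract_heatwave_events_spec : Claim_equal_extract_heatwave_events := by
  intro l _
  show extract_heatwave_events l = extract_heatwave_events_alt l
  rw [A_eq_groups, B_eq_groups]
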